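-- pv_equiv track=rewrite | github.com/DrCharlie-GP/litersearch | litersearch/scripts/advanced_scoring.py | detect_study_type
-- ===== SOURCE A (Python) =====
-- from typing import Dict, List, Optional, Tuple
--
-- STUDY_TYPE_WEIGHTS = {
--     'rct': 100,  # 随机对照试验
--     'randomized controlled trial': 100,
--     'randomised controlled trial': 100,
--     'systematic review': 95,  # 系统综述
--     'meta-analysis': 95,  # Meta分析
--     'cohort': 85,  # 队列研究
--     'cohort study': 85,
--     'prospective': 80,  # 前瞻性研究
--     'case-control': 70,  # 病例对照
--     'cross-sectional': 60,  # 横断面研究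
--     'qualitative': 75,  # 定性研究
--     'qualitative study': 75,
--     'mixed methods': 80,  # 混合方法
--     'review': 65,  # 一般综述
--     'case report': 40,  # 病例报告
--     'case series': 45,  # 病例系列
-- }
--
-- def detect_study_type(title: str, abstract: str) -> Tuple[str, int]:
--     """
--     检测研究类型并返回权重
--
--     参数：
--         title: 论文标题
--         abstract: 摘要
--
--     返回：
--         (研究类型, 权重)
--     """
--     text = (title + ' ' + abstract).lower()
--
--     # 按优先级检测
--     detected_types = []
--
--     for study_type, weight in STUDY_TYPE_WEIGHTS.items():
--         if study_type in text:
--             detected_types.append((study_type, weight))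
--
--     if detected_types:
--         # 返回权重最高的类型
--         detected_types.sort(key=lambda x: x[1], reverse=True)
--         return detected_types[0]
--
--     return ('unknown', 50)
-- ===== SOURCE B (Python) =====
-- STUDY_TYPE_WEIGHTS = {
--     'rct': 100,
--     'randomized controlled trial': 100,
--     'randomised controlled trial': 100,
--     'systematic review': 95,
--     'meta-analysis': 95,
--     'cohort': 85,
--     'cohort study': 85,
--     'prospective': 80,
--     'case-control': 70,
--     'cross-sectional': 60,
--     'qualitative': 75,
--     'qualitative study': 75,
--     'mixed methods': 80,
--     'review': 65,
--     'case report': 40,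
--     'case series': 45,
-- }
--
--
-- def detect_study_type(title: str, abstract: str):
--     text = (title + ' ' + abstract).lower()
--     best = None
--     for study_type, weight in STUDY_TYPE_WEIGHTS.items():
--         if study_type in text and (best is None or weight > best[1]):
--             best = (study_type, weight)
--     return best if best is not None else ('unknown', 50)
-- ===== Notes on version B (the rewrite author's own statement) =====
-- stated objective: simpler
-- what changed: Replaces the collect-matches-into-a-list-then-stable-reverse-sort-and-take-head strategy with a single pass that keeps the current best match (strict > preserves A's first-in-insertion-order tie-breaking), building and sorting no list.
import Mathlib
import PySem

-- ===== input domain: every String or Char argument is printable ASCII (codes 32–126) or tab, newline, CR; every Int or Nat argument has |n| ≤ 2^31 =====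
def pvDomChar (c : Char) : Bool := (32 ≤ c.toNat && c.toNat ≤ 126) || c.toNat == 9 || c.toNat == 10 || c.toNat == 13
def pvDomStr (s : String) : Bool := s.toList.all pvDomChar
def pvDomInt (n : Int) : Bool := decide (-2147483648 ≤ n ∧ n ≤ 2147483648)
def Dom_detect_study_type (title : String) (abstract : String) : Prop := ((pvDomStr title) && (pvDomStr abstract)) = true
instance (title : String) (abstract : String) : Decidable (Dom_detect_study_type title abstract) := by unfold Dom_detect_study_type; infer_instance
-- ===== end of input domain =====

-- B replaces A's collect-into-list-then-stable-reverse-sort-then-take-head by a single pass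
-- keeping the current best match (strict > keeps A's first-in-insertion-order tie-break); objective: simpler.


-- STUDY_TYPE_WEIGHTS: the module-level dict, as an association list in insertion order (all keys distinct)
def pvStudyTypeWeights : List (String × Int) :=
  [("rct", 100),
   ("randomized controlled trial", 100),
   ("randomised controlled trial", 100),
   ("systematic review", 95),
   ("meta-analysis", 95),
   ("cohort", 85),
   ("cohort study", 85),
   ("prospective", 80),
   ("case-control", 70),
   ("cross-sectional", 60),
   ("qualitative", 75),
   ("qualitative study", 75),
   ("mixed methods", 80),
   ("review", 65),
   ("case report", 40),
   ("case series", 45)]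

-- ===== PORT A =====
-- A: build the list of matched (type, weight) pairs, stable-sort it by weight descending, return its head.
def detect_study_type (title : String) (abstract : String) : String × Int :=
  let text := PySem.Str.lower (title ++ " " ++ abstract)
  let detected := pvStudyTypeWeights.foldl
    (fun acc p => if PySem.Str.isIn p.1 text then acc ++ [p] else acc) []
  if detected ≠ [] then
    -- detected_types.sort(key=λx. x[1], reverse=True); return detected_types[0] (guarded nonempty)
    (PySem.List.sorted detected (fun x => x.2) true).headD ("unknown", 50)
  else ("unknown", 50)

-- ===== PORT B =====
-- B: one pass over the dict items keeping the current best match (strict > for Python's tie-break).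
def detect_study_type_alt (title : String) (abstract : String) : String × Int :=
  let text := PySem.Str.lower (title ++ " " ++ abstract)
  let best := pvStudyTypeWeights.foldl
    (fun best p =>
      if PySem.Str.isIn p.1 text &&
         (match best with | none => true | some q => decide (q.2 < p.2))
      then some p else best)
    (none : Option (String × Int))
  match best with
  | some b => b
  | none => ("unknown", 50)

-- ===== PRECONDITION & SPEC =====
def Spec_detect_study_type (title : String) (abstract : String) (out : String × Int) : Prop := out = detect_study_type_alt title abstract
instance (title : String) (abstract : String) (out : String × Int) : Decidable (Spec_detect_study_type title abstract out) := by unfold Spec_detect_study_type; infer_instance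

-- ===== CLAIM (what is proved, stated in full; the proofs are below) =====
def Claim_equal_detect_study_type : Prop := ∀ (title : String) (abstract : String), Dom_detect_study_type title abstract → Spec_detect_study_type title abstract (detect_study_type title abstract)

-- ===== LEMMAS AND PROOFS =====

-- B's loop body, isolated for the proofs (q.2 < p.2 is 'weight > best[1]')
def pvStep (b : Option (String × Int)) (p : String × Int) : Option (String × Int) :=
  if (match b with | none => true | some q => decide (q.2 < p.2)) then some p else b

lemma pvHead_insertBy (b : (String × Int) → (String × Int) → Bool) (x : String × Int) :
    ∀ s : List (String × Int),
      (PySem.List.insertBy b x s).head? =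
        some (match s with | [] => x | q :: _ => if b x q then x else q) := by
  intro s
  cases s with
  | nil => simp [PySem.List.insertBy]
  | cons q t =>
    by_cases h : b x q = true <;> simp [PySem.List.insertBy, h]

-- head of the stable reverse sort = B's running best (first maximal element)
lemma pvHead_sorted_rev (l : List (String × Int)) :
    (PySem.List.sorted l (fun x => x.2) true).head? = l.foldl pvStep none := by
  induction l using List.reverseRecOn with
  | nil => simp [PySem.List.sorted_rev_eq_foldl_insertBy]
  | append_singleton l x ih =>
    rw [PySem.List.sorted_rev_eq_foldl_insertBy, List.foldl_append,
        ← PySem.List.sorted_rev_eq_foldl_insertBy, List.foldl_append]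
    cases h : PySem.List.sorted l (fun x => x.2) true with
    | nil =>
      have hl : l = [] := (PySem.List.sorted_eq_nil_iff l _ true).mp h
      subst hl
      simp [PySem.List.insertBy, pvStep]
    | cons q t =>
      rw [h] at ih
      simp only [List.head?_cons] at ih
      simp only [List.foldl_cons, List.foldl_nil]
      rw [pvHead_insertBy, ← ih]
      by_cases hlt : q.2 < x.2 <;> simp [pvStep, hlt]

-- B's guarded loop body = filter by the match condition, then pvStep
lemma pvAltFold (text : String) (l : List (String × Int)) (init : Option (String × Int)) :
    l.foldl
      (fun best p =>
        if PySem.Str.isIn p.1 text &&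
           (match best with | none => true | some q => decide (q.2 < p.2))
        then some p else best) init
    = (l.filter (fun p => PySem.Str.isIn p.1 text)).foldl pvStep init := by
  rw [List.foldl_filter]
  have hf : (fun (x : Option (String × Int)) (y : String × Int) =>
      if PySem.Str.isIn y.1 text = true then pvStep x y else x)
      = (fun (best : Option (String × Int)) (p : String × Int) =>
        if PySem.Str.isIn p.1 text &&
           (match best with | none => true | some q => decide (q.2 < p.2))
        then some p else best) := by
    funext b p
    cases b with
    | none => by_cases h1 : PySem.Str.isIn p.1 text = true <;> simp [pvStep]
    | some q =>
      by_cases h1 : PySem.Str.isIn p.1 text = true <;>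
        by_cases h2 : q.2 < p.2 <;> simp [pvStep, h2]
  rw [← hf]

-- ===== VERDICT (by name: the statement is the Claim_ definition above) =====
theorem detect_study_type_spec : Claim_equal_detect_study_type := by
  intro title abstract _
  unfold Spec_detect_study_type detect_study_type detect_study_type_alt
  simp only []
  set text := PySem.Str.lower (title ++ " " ++ abstract) with htext
  have hdet : pvStudyTypeWeights.foldl
      (fun acc p => if PySem.Str.isIn p.1 text then acc ++ [p] else acc) [] =
      pvStudyTypeWeights.filter (fun p => PySem.Str.isIn p.1 text) := by
    have := PySem.List.foldl_append_if (fun p : String × Int => PySem.Str.isIn p.1 text)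
      (fun p => p) pvStudyTypeWeights []
    simpa using this
  rw [hdet, pvAltFold, ← pvHead_sorted_rev]
  by_cases hne : pvStudyTypeWeights.filter (fun p => PySem.Str.isIn p.1 text) = []
  · rw [hne]
    simp [PySem.List.sorted_rev_eq_foldl_insertBy]
  · have hs : PySem.List.sorted (pvStudyTypeWeights.filter (fun p => PySem.Str.isIn p.1 text))
        (fun x => x.2) true ≠ [] := by
      intro h
      exact hne ((PySem.List.sorted_eq_nil_iff _ _ true).mp h)
    cases h : PySem.List.sorted (pvStudyTypeWeights.filter (fun p => PySem.Str.isIn p.1 text))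
        (fun x => x.2) true with
    | nil => exact absurd h hs
    | cons q t =>
      rw [if_pos hne]
      simp
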